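-- pv_equiv track=rewrite | github.com/ameldocena/StratifiedAggregation | aggregators/aligned_avg.py | _get_previous_layer
-- ===== SOURCE A (Python) =====
-- def _get_previous_layer(state_dict, layer):
--     prev = None
--     for i in state_dict.keys():
--         if i == layer:
--             return prev
--         elif 'num_batches_tracked' not in i:
--             prev = i
--         else:
--             continue
-- ===== SOURCE B (Python) =====
-- def _get_previous_layer(state_dict, layer):
--     keys = list(state_dict.keys())
--     if layer not in keys:
--         return None
--     idx = keys.index(layer)
--     for k in reversed(keys[:idx]):
--         if 'num_batches_tracked' not in k:
--             return k
--     return None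
-- ===== Notes on version B (the rewrite author's own statement) =====
-- stated objective: alternative
-- what changed: B separates locating the layer (membership + index) from the search, then scans the prefix backward for the first non-'num_batches_tracked' key, instead of A's single forward pass carrying a prev accumulator.
import Mathlib
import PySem

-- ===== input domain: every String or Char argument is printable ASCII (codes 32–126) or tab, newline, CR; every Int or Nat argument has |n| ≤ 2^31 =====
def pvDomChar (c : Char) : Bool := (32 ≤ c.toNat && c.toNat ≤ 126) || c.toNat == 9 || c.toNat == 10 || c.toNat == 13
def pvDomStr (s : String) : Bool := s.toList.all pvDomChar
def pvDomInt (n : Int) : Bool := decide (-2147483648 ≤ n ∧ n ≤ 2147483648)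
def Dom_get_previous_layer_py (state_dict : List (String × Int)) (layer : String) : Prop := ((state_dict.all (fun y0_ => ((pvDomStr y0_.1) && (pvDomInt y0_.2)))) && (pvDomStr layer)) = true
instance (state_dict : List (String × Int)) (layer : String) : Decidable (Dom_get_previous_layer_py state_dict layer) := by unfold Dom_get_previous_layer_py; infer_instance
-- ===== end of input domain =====

-- ===== PORT A =====
-- B differs from A by decomposition: A is one forward pass with a prev accumulator; B finds the layer's index and scans the prefix backward.
-- loop of A: for i in state_dict.keys(): if i == layer: return prev; elif 'num_batches_tracked' not in i: prev = i
def pvGoA (ks : List String) (layer : String) (prev : Option String) : Option String :=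
  match ks with
  | [] => none
  | k :: t =>
      if k = layer then prev
      else if PySem.Str.isIn "num_batches_tracked" k = false then pvGoA t layer (some k)
      else pvGoA t layer prev

def get_previous_layer_py (state_dict : List (String × Int)) (layer : String) : Option String :=
  pvGoA (PySem.Dict.ofList state_dict).keys layer none

-- ===== PORT B =====
-- loop of B: for k in reversed(keys[:idx]): if 'num_batches_tracked' not in k: return k
def pvScanBack (ks : List String) : Option String :=
  match ks with
  | [] => none
  | k :: t => if PySem.Str.isIn "num_batches_tracked" k = false then some k else pvScanBack t

def get_previous_layer_py_alt (state_dict : List (String × Int)) (layer : String) : Option String :=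
  let keys := (PySem.Dict.ofList state_dict).keys
  if layer ∈ keys then
    match PySem.List.index? keys layer with
    | some idx => pvScanBack ((keys.take idx).reverse)
    | none => none
  else none

-- ===== PRECONDITION & SPEC =====
def Spec_get_previous_layer_py (state_dict : List (String × Int)) (layer : String) (out : Option String) : Prop := out = get_previous_layer_py_alt state_dict layer
instance (state_dict : List (String × Int)) (layer : String) (out : Option String) : Decidable (Spec_get_previous_layer_py state_dict layer out) := by unfold Spec_get_previous_layer_py; infer_instance

-- ===== CLAIM (what is proved, stated in full; the proofs are below) =====
def Claim_equal_get_previous_layer_py : Prop := ∀ (state_dict : List (String × Int)) (layer : String), Dom_get_previous_layer_py state_dict layer → Spec_get_previous_layer_py state_dict layer (get_previous_layer_py state_dict layer)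

-- ===== LEMMAS AND PROOFS =====
theorem pvScanBack_append (l l' : List String) :
    pvScanBack (l ++ l') = (pvScanBack l).or (pvScanBack l') := by
  induction l with
  | nil => simp [pvScanBack]
  | cons k t ih =>
    simp only [List.cons_append, pvScanBack, ih]
    split <;> simp

theorem pvGoA_eq (ks : List String) (layer : String) (prev : Option String) :
    pvGoA ks layer prev =
      match PySem.List.index? ks layer with
      | none => none
      | some i => (pvScanBack ((ks.take i).reverse)).or prev := by
  induction ks generalizing prev with
  | nil => simp [pvGoA, PySem.List.index?]
  | cons k t ih =>
    by_cases hk : k = layer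
    · subst hk
      rw [PySem.List.index?_cons_self]
      simp [pvGoA, pvScanBack]
    · have hne : k ≠ layer := hk
      rw [pvGoA, if_neg hk, PySem.List.index?_cons_of_ne t hne]
      by_cases hp : PySem.Str.isIn "num_batches_tracked" k = false
      · rw [if_pos hp, ih]
        cases h : PySem.List.index? t layer with
        | none => simp
        | some i =>
          simp only [Option.map_some]
          rw [List.take_succ_cons, List.reverse_cons, pvScanBack_append]
          simp at hp
          simp [pvScanBack, hp]
      · rw [if_neg hp, ih]
        cases h : PySem.List.index? t layer with
        | none => simp
        | some i =>
          simp only [Option.map_some]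
          rw [List.take_succ_cons, List.reverse_cons, pvScanBack_append]
          have hp' : PySem.Str.isIn "num_batches_tracked" k = true := by
            revert hp; cases PySem.Str.isIn "num_batches_tracked" k <;> simp
          simp at hp'
          simp [pvScanBack, hp']

-- ===== VERDICT (by name: the statement is the Claim_ definition above) =====
theorem get_previous_layer_py_spec : Claim_equal_get_previous_layer_py := by
  intro state_dict layer _
  unfold Spec_get_previous_layer_py get_previous_layer_py get_previous_layer_py_alt
  dsimp only
  set ks := (PySem.Dict.ofList state_dict).keys with hks
  rw [pvGoA_eq]
  cases h : PySem.List.index? ks layer with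
  | none =>
    have hm : layer ∉ ks := (PySem.List.index?_eq_none_iff ks layer).mp h
    simp [hm]
  | some i =>
    have hm : layer ∈ ks := (PySem.List.index?_isSome_iff ks layer).mp (by rw [h]; rfl)
    rw [if_pos hm]
    exact Option.or_none
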